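-- pv_equiv track=rewrite | github.com/swanhtet01/swanhtet01.github.io | real_dev_operations_v2.py | apply_code_improvements
-- ===== SOURCE A (Python) =====
-- def apply_code_improvements(content):
--     """Apply real code improvements"""
--     lines = content.splitlines()
--     improved_lines = []
--
--     for line in lines:
--         # Remove trailing whitespace
--         cleaned_line = line.rstrip()
--
--         # Fix common spacing issues
--         if '=' in cleaned_line and not any(op in cleaned_line for op in ['==', '!=', '<=', '>=', '=>']):
--             # Add proper spacing around assignment
--             parts = cleaned_line.split('=', 1)
--             if len(parts) == 2 and not cleaned_line.strip().startswith('#'):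
--                 cleaned_line = f"{parts[0].strip()} = {parts[1].strip()}"
--
--         # Fix spacing around commas
--         if ',' in cleaned_line and not cleaned_line.strip().startswith('#'):
--             cleaned_line = ', '.join(part.strip() for part in cleaned_line.split(','))
--
--         improved_lines.append(cleaned_line)
--
--     # Remove excessive blank lines
--     final_lines = []
--     blank_count = 0
--
--     for line in improved_lines:
--         if line.strip() == '':
--             blank_count += 1
--             if blank_count <= 2:  # Max 2 consecutive blank lines
--                 final_lines.append(line)
--         else:
--             blank_count = 0
--             final_lines.append(line)
--
--     return '\n'.join(final_lines)
-- ===== SOURCE B (Python) =====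
-- def _clean_line(raw):
--     line = raw.rstrip()
--     if '=' in line and all(op not in line for op in ('==', '!=', '<=', '>=', '=>')):
--         parts = line.split('=', 1)
--         if len(parts) == 2 and not line.strip().startswith('#'):
--             line = parts[0].strip() + ' = ' + parts[1].strip()
--     if ',' in line and not line.strip().startswith('#'):
--         line = ', '.join(p.strip() for p in line.split(','))
--     return line
--
--
-- def apply_code_improvements(content):
--     """Apply real code improvements (single pass, lookback instead of a counter)"""
--     out = []
--     for raw in content.splitlines():
--         line = _clean_line(raw)
--         if line.strip() == '' and len(out) >= 2 and out[-1].strip() == '' and out[-2].strip() == '':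
--             continue
--         out.append(line)
--     return '\n'.join(out)
-- ===== Notes on version B (the rewrite author's own statement) =====
-- stated objective: alternative
-- what changed: B fuses A's two passes into one loop over splitlines (clean each line, then decide immediately), and replaces the blank_count state machine by a stateless lookback that skips a blank line only when the last two emitted lines are blank.
import Mathlib
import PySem

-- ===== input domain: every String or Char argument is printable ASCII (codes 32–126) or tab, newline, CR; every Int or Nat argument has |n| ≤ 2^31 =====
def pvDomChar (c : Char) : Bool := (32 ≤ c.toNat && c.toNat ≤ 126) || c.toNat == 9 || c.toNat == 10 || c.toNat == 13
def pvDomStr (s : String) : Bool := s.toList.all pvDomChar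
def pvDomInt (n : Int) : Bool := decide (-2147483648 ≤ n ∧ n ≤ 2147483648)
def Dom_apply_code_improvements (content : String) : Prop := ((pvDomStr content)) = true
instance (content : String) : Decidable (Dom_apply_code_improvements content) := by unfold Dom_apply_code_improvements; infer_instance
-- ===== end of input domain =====

-- B fuses A's two passes into one loop and replaces the blank_count counter by a lookback
-- on the last two emitted lines (objective: alternative decomposition, same cost).


-- ===== PORT A =====
def apply_code_improvements (content : String) : String :=
  let lines := PySem.Str.splitlines content
  let improved_lines := lines.foldl (fun improved_lines line =>
    -- cleaned_line = line.rstrip()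
    let cleaned_line := PySem.Str.rstrip line
    -- '=' spacing fix
    let cleaned_line :=
      if PySem.Str.isIn "=" cleaned_line &&
         !(PySem.Str.isIn "==" cleaned_line || PySem.Str.isIn "!=" cleaned_line ||
           PySem.Str.isIn "<=" cleaned_line || PySem.Str.isIn ">=" cleaned_line ||
           PySem.Str.isIn "=>" cleaned_line) then
        match PySem.Str.splitMax? cleaned_line "=" 1 with
        | some parts =>
            if parts.length == 2 && !(PySem.Str.startswith (PySem.Str.strip cleaned_line) "#") then
              PySem.Str.strip (parts.getD 0 "") ++ " = " ++ PySem.Str.strip (parts.getD 1 "")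
            else cleaned_line
        | none => cleaned_line   -- unreachable: sep "=" is nonempty
      else cleaned_line
    -- comma spacing fix
    let cleaned_line :=
      if PySem.Str.isIn "," cleaned_line && !(PySem.Str.startswith (PySem.Str.strip cleaned_line) "#") then
        match PySem.Str.split? cleaned_line "," with
        | some parts => PySem.Str.join ", " (parts.map PySem.Str.strip)
        | none => cleaned_line   -- unreachable: sep "," is nonempty
      else cleaned_line
    improved_lines ++ [cleaned_line]) []
  -- second pass: remove excessive blank lines with a counter
  let final := improved_lines.foldl (fun (st : Nat × List String) line =>
    if PySem.Str.strip line == "" then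
      let bc := st.1 + 1
      (bc, if bc ≤ 2 then st.2 ++ [line] else st.2)
    else (0, st.2 ++ [line])) (0, [])
  PySem.Str.join "\n" final.2

-- ===== PORT B =====
-- Source B helper _clean_line
def pvCleanLine (raw : String) : String :=
  let line := PySem.Str.rstrip raw
  let line :=
    if PySem.Str.isIn "=" line &&
       (!PySem.Str.isIn "==" line && !PySem.Str.isIn "!=" line &&
        !PySem.Str.isIn "<=" line && !PySem.Str.isIn ">=" line &&
        !PySem.Str.isIn "=>" line) then
      match PySem.Str.splitMax? line "=" 1 with
      | some parts =>
          if parts.length == 2 && !(PySem.Str.startswith (PySem.Str.strip line) "#") then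
            PySem.Str.strip (parts.getD 0 "") ++ " = " ++ PySem.Str.strip (parts.getD 1 "")
          else line
      | none => line
    else line
  if PySem.Str.isIn "," line && !(PySem.Str.startswith (PySem.Str.strip line) "#") then
    match PySem.Str.split? line "," with
    | some parts => PySem.Str.join ", " (parts.map PySem.Str.strip)
    | none => line
  else line

def apply_code_improvements_alt (content : String) : String :=
  let out := (PySem.Str.splitlines content).foldl (fun out raw =>
    let line := pvCleanLine raw
    if PySem.Str.strip line == "" && decide (2 ≤ out.length) &&
       ((PySem.List.pyGet? out (-1)).elim false (fun l => PySem.Str.strip l == "")) &&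
       ((PySem.List.pyGet? out (-2)).elim false (fun l => PySem.Str.strip l == "")) then
      out
    else out ++ [line]) []
  PySem.Str.join "\n" out

-- ===== PRECONDITION & SPEC =====
def Spec_apply_code_improvements (content : String) (out : String) : Prop := out = apply_code_improvements_alt content
instance (content : String) (out : String) : Decidable (Spec_apply_code_improvements content out) := by unfold Spec_apply_code_improvements; infer_instance

-- ===== CLAIM (what is proved, stated in full; the proofs are below) =====
def Claim_equal_apply_code_improvements : Prop := ∀ (content : String), Dom_apply_code_improvements content → Spec_apply_code_improvements content (apply_code_improvements content)

-- ===== LEMMAS AND PROOFS =====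

def pvIsb (s : String) : Bool := PySem.Str.strip s == ""

-- invariant relating A's blank counter to the shape of the emitted list
def pvRel (bc : Nat) (acc : List String) : Prop :=
  if bc = 0 then acc = [] ∨ ∃ ys l, acc = ys ++ [l] ∧ pvIsb l = false
  else if bc = 1 then
    (∃ l, acc = [l] ∧ pvIsb l = true) ∨
    (∃ zs m l, acc = zs ++ [m, l] ∧ pvIsb m = false ∧ pvIsb l = true)
  else ∃ ys l m, acc = ys ++ [m, l] ∧ pvIsb l = true ∧ pvIsb m = true

def pvStepA (st : Nat × List String) (line : String) : Nat × List String :=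
  if PySem.Str.strip line == "" then
    let bc := st.1 + 1
    (bc, if bc ≤ 2 then st.2 ++ [line] else st.2)
  else (0, st.2 ++ [line])

def pvStepB (out : List String) (raw : String) : List String :=
  let line := pvCleanLine raw
  if PySem.Str.strip line == "" && decide (2 ≤ out.length) &&
     ((PySem.List.pyGet? out (-1)).elim false (fun l => PySem.Str.strip l == "")) &&
     ((PySem.List.pyGet? out (-2)).elim false (fun l => PySem.Str.strip l == "")) then
    out
  else out ++ [line]

-- A's inline per-line transform, named for the proof
def pvCleanA (raw : String) : String :=
  let cleaned_line := PySem.Str.rstrip raw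
  let cleaned_line :=
    if PySem.Str.isIn "=" cleaned_line &&
       !(PySem.Str.isIn "==" cleaned_line || PySem.Str.isIn "!=" cleaned_line ||
         PySem.Str.isIn "<=" cleaned_line || PySem.Str.isIn ">=" cleaned_line ||
         PySem.Str.isIn "=>" cleaned_line) then
      match PySem.Str.splitMax? cleaned_line "=" 1 with
      | some parts =>
          if parts.length == 2 && !(PySem.Str.startswith (PySem.Str.strip cleaned_line) "#") then
            PySem.Str.strip (parts.getD 0 "") ++ " = " ++ PySem.Str.strip (parts.getD 1 "")
          else cleaned_line
      | none => cleaned_line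
    else cleaned_line
  if PySem.Str.isIn "," cleaned_line && !(PySem.Str.startswith (PySem.Str.strip cleaned_line) "#") then
    match PySem.Str.split? cleaned_line "," with
    | some parts => PySem.Str.join ", " (parts.map PySem.Str.strip)
    | none => cleaned_line
  else cleaned_line

theorem pv_clean_eq (raw : String) : pvCleanA raw = pvCleanLine raw := by
  unfold pvCleanA pvCleanLine
  simp

theorem pv_pyGet_neg1 (ys : List String) (l : String) :
    PySem.List.pyGet? (ys ++ [l]) (-1) = some l := by
  simp [PySem.List.pyGet?, PySem.List.pyIdx?]

theorem pv_pyGet_neg2 (ys : List String) (m l : String) :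
    PySem.List.pyGet? (ys ++ [m, l]) (-2) = some m := by
  simp [PySem.List.pyGet?, PySem.List.pyIdx?]

theorem pv_main (ls : List String) (bc : Nat) (acc : List String) (h : pvRel bc acc) :
    (List.foldl pvStepA (bc, acc) (ls.map pvCleanLine)).2 = List.foldl pvStepB acc ls := by
  induction ls generalizing bc acc with
  | nil => rfl
  | cons r ls ih =>
    simp only [List.map_cons, List.foldl_cons]
    by_cases hb : (PySem.Str.strip (pvCleanLine r) == "") = true
    · match bc with
      | 0 =>
        rcases h with h | ⟨ys, l, rfl, hl⟩
        · subst h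
          rw [show pvStepA (0, []) (pvCleanLine r) = (1, [] ++ [pvCleanLine r]) by
                simp [pvStepA, hb],
              show pvStepB [] r = [] ++ [pvCleanLine r] by simp [pvStepB, hb]]
          exact ih 1 _ (by simp only [pvRel]; norm_num; exact Or.inl (by simpa [pvIsb] using hb))
        · rw [show pvStepA (0, ys ++ [l]) (pvCleanLine r) = (1, (ys ++ [l]) ++ [pvCleanLine r]) by
                simp [pvStepA, hb],
              show pvStepB (ys ++ [l]) r = (ys ++ [l]) ++ [pvCleanLine r] by
                simp [pvStepB, hb, pvIsb] at hl ⊢; simp [hl],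
              ]
          exact ih 1 _ (by
            simp only [pvRel]; norm_num
            exact Or.inr ⟨ys, l, pvCleanLine r, by simp, hl, by simpa [pvIsb] using hb⟩)
      | 1 =>
        rcases h with ⟨l, rfl, hl⟩ | ⟨zs, m, l, rfl, hm, hl⟩
        · rw [show pvStepA (1, [l]) (pvCleanLine r) = (2, [l] ++ [pvCleanLine r]) by
                simp [pvStepA, hb],
              show pvStepB [l] r = [l] ++ [pvCleanLine r] by simp [pvStepB, hb]]
          exact ih 2 _ (by
            simp only [pvRel]; norm_num
            exact ⟨[], pvCleanLine r, l, by simp, by simpa [pvIsb] using hb, hl⟩)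
        · rw [show pvStepA (1, zs ++ [m, l]) (pvCleanLine r) = (2, (zs ++ [m, l]) ++ [pvCleanLine r]) by
                simp [pvStepA, hb],
              show pvStepB (zs ++ [m, l]) r = (zs ++ [m, l]) ++ [pvCleanLine r] by
                simp [pvStepB, hb, pv_pyGet_neg2, pvIsb] at hm ⊢; simp [hm]]
          exact ih 2 _ (by
            simp only [pvRel]; norm_num
            exact ⟨zs ++ [m], pvCleanLine r, l, by simp, by simpa [pvIsb] using hb, hl⟩)
      | (n + 2) =>
        obtain ⟨ys, l, m, rfl, hl, hm⟩ := h
        rw [show pvStepA (n + 2, ys ++ [m, l]) (pvCleanLine r) = (n + 3, ys ++ [m, l]) by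
              simp [pvStepA, hb],
            show pvStepB (ys ++ [m, l]) r = ys ++ [m, l] by
              have h1 : PySem.List.pyGet? (ys ++ [m, l]) (-1) = some l := by
                simpa using pv_pyGet_neg1 (ys ++ [m]) l
              simp [pvStepB, hb, h1, pv_pyGet_neg2, pvIsb] at hl hm ⊢; simp [hl, hm]]
        exact ih (n + 3) _ (by
          simp only [pvRel]; norm_num
          exact ⟨ys, l, m, rfl, hl, hm⟩)
    · rw [show pvStepA (bc, acc) (pvCleanLine r) = (0, acc ++ [pvCleanLine r]) by
            simp [pvStepA, hb],
          show pvStepB acc r = acc ++ [pvCleanLine r] by simp [pvStepB, hb]]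
      exact ih 0 _ (by
        simp only [pvRel]
        exact Or.inr ⟨acc, pvCleanLine r, rfl, by simpa [pvIsb] using hb⟩)

theorem pv_firstPass (ls : List String) (init : List String) :
    List.foldl (fun improved_lines line =>
      improved_lines ++ [pvCleanA line]) init ls = init ++ ls.map pvCleanA := by
  induction ls generalizing init with
  | nil => simp
  | cons r ls ih => simp [ih]

theorem apply_code_improvements_spec : Claim_equal_apply_code_improvements := by
  intro content _
  show apply_code_improvements content = apply_code_improvements_alt content
  have hA : apply_code_improvements content =
      PySem.Str.join "\n" (List.foldl pvStepA (0, [])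
        (List.foldl (fun acc line => acc ++ [pvCleanA line]) [] (PySem.Str.splitlines content))).2 := rfl
  have hB : apply_code_improvements_alt content =
      PySem.Str.join "\n" (List.foldl pvStepB [] (PySem.Str.splitlines content)) := rfl
  rw [hA, hB, pv_firstPass, List.nil_append,
      List.map_congr_left (fun l _ => pv_clean_eq l),
      pv_main _ 0 [] (by simp [pvRel])]
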